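-- pv_equiv track=rewrite | github.com/ParasharaRamesh/DSA-Prep | 59-sort stack.py | insertAtCorrectPlace
-- ===== SOURCE A (Python) =====
-- def insertAtCorrectPlace(val, stack):
--     if len(stack) == 0:
--         stack.append(val)
--         return stack
--
--     if val > stack[-1]:
--         stack.append(val)
--         return stack
--
--     top = stack.pop()
--     insertAtCorrectPlace(val, stack)
--     stack.append(top)
--
--     return stack
-- ===== SOURCE B (Python) =====
-- def insertAtCorrectPlace(val, stack):
--     temp = []
--     while stack and val <= stack[-1]:
--         temp.append(stack.pop())
--     stack.append(val)
--     while temp: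
--         stack.append(temp.pop())
--     return stack
-- ===== Notes on version B (the rewrite author's own statement) =====
-- stated objective: alternative
-- what changed: Replaces the recursion (which buffers popped elements on the call stack) with an explicit iterative loop that pops larger-or-equal elements into a temp list, appends val, then pushes the buffer back.
import Mathlib
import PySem

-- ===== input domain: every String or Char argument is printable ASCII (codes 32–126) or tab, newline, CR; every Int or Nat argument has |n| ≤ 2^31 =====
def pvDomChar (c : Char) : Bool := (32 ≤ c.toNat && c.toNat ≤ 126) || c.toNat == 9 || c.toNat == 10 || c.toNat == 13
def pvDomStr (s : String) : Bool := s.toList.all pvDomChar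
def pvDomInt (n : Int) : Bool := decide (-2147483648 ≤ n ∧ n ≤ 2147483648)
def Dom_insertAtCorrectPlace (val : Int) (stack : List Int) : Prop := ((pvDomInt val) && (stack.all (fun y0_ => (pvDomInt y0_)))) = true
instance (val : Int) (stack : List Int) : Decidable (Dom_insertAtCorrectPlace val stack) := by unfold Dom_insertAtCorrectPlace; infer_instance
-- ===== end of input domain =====

-- ===== PORT A =====
-- B replaces A's recursion by an explicit iterative loop with a temp buffer;
-- both mutate `stack` in place in Python — the equivalence proved here is about the return value.
def insertAtCorrectPlace (val : Int) (stack : List Int) : List Int :=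
  match h : stack.getLast? with
  | none => stack ++ [val]                              -- len(stack)==0: stack.append(val); return
  | some top =>
    if val > top then stack ++ [val]                    -- stack.append(val); return
    else insertAtCorrectPlace val stack.dropLast ++ [top]  -- top = stack.pop(); recurse; stack.append(top)
termination_by stack.length
decreasing_by
  have hne : stack ≠ [] := by intro e; subst e; simp at h
  have := List.length_pos_of_ne_nil hne
  simp [List.length_dropLast]; omega

-- ===== PORT B =====
-- while stack and val <= stack[-1]: temp.append(stack.pop())
def pvPopLoop (val : Int) (stack temp : List Int) : List Int × List Int :=
  match h : stack.getLast? with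
  | none => (stack, temp)
  | some top =>
    if val ≤ top then pvPopLoop val stack.dropLast (temp ++ [top])
    else (stack, temp)
termination_by stack.length
decreasing_by
  have hne : stack ≠ [] := by intro e; subst e; simp at h
  have := List.length_pos_of_ne_nil hne
  simp [List.length_dropLast]; omega

-- while temp: stack.append(temp.pop())
def pvPushLoop (temp stack : List Int) : List Int :=
  match h : temp.getLast? with
  | none => stack
  | some x => pvPushLoop temp.dropLast (stack ++ [x])
termination_by temp.length
decreasing_by
  have hne : temp ≠ [] := by intro e; subst e; simp at h
  have := List.length_pos_of_ne_nil hne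
  simp [List.length_dropLast]; omega

def insertAtCorrectPlace_alt (val : Int) (stack : List Int) : List Int :=
  let (s, temp) := pvPopLoop val stack []
  pvPushLoop temp (s ++ [val])

-- ===== PRECONDITION & SPEC =====
def Spec_insertAtCorrectPlace (val : Int) (stack : List Int) (out : List Int) : Prop := out = insertAtCorrectPlace_alt val stack
instance (val : Int) (stack : List Int) (out : List Int) : Decidable (Spec_insertAtCorrectPlace val stack out) := by unfold Spec_insertAtCorrectPlace; infer_instance

-- ===== CLAIM (what is proved, stated in full; the proofs are below) =====
def Claim_equal_insertAtCorrectPlace : Prop := ∀ (val : Int) (stack : List Int), Dom_insertAtCorrectPlace val stack → Spec_insertAtCorrectPlace val stack (insertAtCorrectPlace val stack)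

-- ===== LEMMAS AND PROOFS =====
theorem pvA_nil (val : Int) : insertAtCorrectPlace val [] = [val] := by
  rw [insertAtCorrectPlace]; split <;> simp_all

theorem pvA_concat (val t : Int) (rs : List Int) :
    insertAtCorrectPlace val (rs ++ [t])
      = if val > t then rs ++ [t] ++ [val] else insertAtCorrectPlace val rs ++ [t] := by
  rw [insertAtCorrectPlace]
  split
  · simp_all
  · next top heq =>
      rw [List.getLast?_concat] at heq
      cases heq
      simp

theorem pvPopLoop_nil (val : Int) (temp : List Int) : pvPopLoop val [] temp = ([], temp) := by
  rw [pvPopLoop]; split <;> simp_all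

theorem pvPopLoop_concat (val t : Int) (rs temp : List Int) :
    pvPopLoop val (rs ++ [t]) temp
      = if val ≤ t then pvPopLoop val rs (temp ++ [t]) else (rs ++ [t], temp) := by
  rw [pvPopLoop]
  split
  · simp_all
  · next top heq =>
      rw [List.getLast?_concat] at heq
      cases heq
      simp

theorem pvPushLoop_nil (stack : List Int) : pvPushLoop [] stack = stack := by
  rw [pvPushLoop]; split <;> simp_all

theorem pvPushLoop_concat (x : Int) (xs stack : List Int) :
    pvPushLoop (xs ++ [x]) stack = pvPushLoop xs (stack ++ [x]) := by
  rw [pvPushLoop]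
  split
  · simp_all
  · next y heq =>
      rw [List.getLast?_concat] at heq
      cases heq
      simp

-- pushLoop pops from the end of temp, restoring the original order: it appends temp reversed.
theorem pvPushLoop_eq (u : List Int) : ∀ (s : List Int), pvPushLoop u.reverse s = s ++ u := by
  induction u with
  | nil => intro s; simp [pvPushLoop_nil]
  | cons x xs ih =>
    intro s
    rw [show (x :: xs).reverse = xs.reverse ++ [x] by simp, pvPushLoop_concat, ih]
    simp

-- loop invariant: B run on r.reverse with buffer temp = A's answer followed by temp reversed.
theorem pvCore_eq (val : Int) (r : List Int) : ∀ (temp : List Int),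
    pvPushLoop (pvPopLoop val r.reverse temp).2 ((pvPopLoop val r.reverse temp).1 ++ [val])
      = insertAtCorrectPlace val r.reverse ++ temp.reverse := by
  induction r with
  | nil =>
    intro temp
    rw [List.reverse_nil, pvPopLoop_nil, pvA_nil]
    have h := pvPushLoop_eq temp.reverse [val]
    simpa using h
  | cons t rs ih =>
    intro temp
    rw [show (t :: rs).reverse = rs.reverse ++ [t] by simp, pvPopLoop_concat, pvA_concat]
    by_cases hv : val ≤ t
    · rw [if_pos hv, if_neg (by omega), ih (temp ++ [t])]
      simp
    · rw [if_neg hv, if_pos (by omega)]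
      have h := pvPushLoop_eq temp.reverse ((rs.reverse ++ [t]) ++ [val])
      simpa using h

-- ===== VERDICT (by name: the statement is the Claim_ definition above) =====
theorem insertAtCorrectPlace_spec : Claim_equal_insertAtCorrectPlace := by
  intro val stack _
  unfold Spec_insertAtCorrectPlace insertAtCorrectPlace_alt
  have h := pvCore_eq val stack.reverse []
  simp at h
  simp [h]
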